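-- pv_equiv track=rewrite | github.com/yellowbyte/distributed-ml-training-outdated | smart_config/constraint_map_gen.py | create_all_splits
-- ===== SOURCE A (Python) =====
-- from itertools import groupby, islice, tee
-- from operator import itemgetter
-- from typing import Tuple, List, Set,Any
--
-- def create_all_splits(layers_info: Tuple[int,int]) -> Set[Set[int]]:
--     """
--     Given layers encoded in `layers_info`, create
--     all possible combinations
--
--     :param layers_info: start and end index/pos of a model's layers
--     :return: all combinations
--     """
--     def consecutive_subseq(iterable, length):
--         """
--         Get consecutive subsequence of size `length` in `iterable`
--         source:
--         stackoverflow.com/questions/23860898/pythonic-find-all-consecutive-sub-sequences-of-certain-length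
--         """
--         for _, consec_run in groupby(enumerate(iterable), lambda x: x[0] - x[1]):
--             k_wise = tee(map(itemgetter(1), consec_run), length)
--             for n, it in enumerate(k_wise):
--                 next(islice(it, n, n), None) # consume n items from it
--             yield from zip(*k_wise)
--
--     # setup
--     start,end = layers_info
--     num_layers: int = end-start+1
--     layers = list(range(start,end+1))
--
--     out: List[List[int]] = list()
--
--     # reproduce the summation formula
--     for cur_index in range(num_layers):
--         # cur_index+1 number of consecutive parts
--         cur_consec: int = cur_index+1
--         out.extend(list(consecutive_subseq(layers, cur_consec)))
--     return set(out)
-- ===== SOURCE B (Python) =====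
-- def create_all_splits(layers_info):
--     """All contiguous sub-intervals of range(start, end+1), as a set of tuples."""
--     start, end = layers_info
--     layers = list(range(start, end + 1))
--     n = len(layers)
--     result = set()
--     for length in range(1, n + 1):
--         for i in range(n - length + 1):
--             result.add(tuple(layers[i:i + length]))
--     return result
-- ===== Notes on version B (the rewrite author's own statement) =====
-- stated objective: simpler
-- what changed: Replaces the groupby/tee/islice sliding-window generator machinery with two plain index loops over (length, start) that take slices layers[i:i+length] directly.
import Mathlib
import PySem

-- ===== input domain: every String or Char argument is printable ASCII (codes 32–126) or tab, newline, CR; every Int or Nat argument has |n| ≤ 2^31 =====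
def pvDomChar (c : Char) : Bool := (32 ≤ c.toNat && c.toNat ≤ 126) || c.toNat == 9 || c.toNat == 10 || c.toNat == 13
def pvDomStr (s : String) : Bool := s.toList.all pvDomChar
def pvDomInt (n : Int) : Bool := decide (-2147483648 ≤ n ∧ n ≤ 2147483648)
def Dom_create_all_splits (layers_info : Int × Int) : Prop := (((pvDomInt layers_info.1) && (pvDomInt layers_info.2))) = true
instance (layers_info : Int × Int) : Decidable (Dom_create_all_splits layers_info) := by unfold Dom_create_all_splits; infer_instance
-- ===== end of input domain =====

-- B replaces A's groupby/tee/islice sliding-window generator with two plain index loops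
-- taking slices layers[i:i+length] directly (objective: simpler); return values proved equal.


-- ===== PORT A =====
-- itertools.groupby(enumerate(iterable), key = fst - snd): maximal runs of equal key
def pyGroupByKeyDiff : List (Int × Int) → List (List (Int × Int))
  | [] => []
  | x :: xs =>
    match pyGroupByKeyDiff xs with
    | [] => [[x]]
    | g :: gs =>
      match g with
      | [] => [x] :: gs
      | y :: _ => if x.1 - x.2 == y.1 - y.2 then (x :: g) :: gs else [x] :: g :: gs

-- zip(*k_wise): emit heads while every iterator is nonempty (zip stops at the shortest)
def zipHeads : List (List Int) → List (List Int)
  | [] => []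
  | [] :: _ => []
  | (x :: xs) :: rest =>
    if rest.any List.isEmpty then []
    else (x :: rest.map (fun l => l.headI)) :: zipHeads (xs :: rest.map (fun l => l.tail))
termination_by ls => (ls.headD []).length
decreasing_by simp

-- the inner generator: tee copy n is advanced by n (= drop n), then zip(*k_wise)
def consecutive_subseq (iterable : List Int) (length : Nat) : List (List Int) :=
  (pyGroupByKeyDiff (PySem.List.enumerate iterable 0)).flatMap
    (fun g => zipHeads ((List.range length).map (fun n => (g.map Prod.snd).drop n)))

def create_all_splits (layers_info : Int × Int) : List (List Int) :=
  let start := layers_info.1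
  let «end» := layers_info.2
  let num_layers : Int := «end» - start + 1
  let layers := PySem.List.pyRange start («end» + 1) 1
  let out : List (List Int) :=
    (PySem.List.pyRange 0 num_layers 1).foldl
      (fun acc cur_index => acc ++ consecutive_subseq layers (cur_index + 1).toNat) []
  PySem.Set.ofList out

-- ===== PORT B =====
def create_all_splits_alt (layers_info : Int × Int) : List (List Int) :=
  let layers := PySem.List.pyRange layers_info.1 (layers_info.2 + 1) 1
  let n : Int := layers.length
  (PySem.List.pyRange 1 (n + 1) 1).foldl
    (fun res len =>
      (PySem.List.pyRange 0 (n - len + 1) 1).foldl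
        (fun res i => PySem.Set.add res (PySem.List.slice layers (some i) (some (i + len)))) res)
    PySem.Set.empty

-- ===== PRECONDITION & SPEC =====
def Spec_create_all_splits (layers_info : Int × Int) (out : List (List Int)) : Prop := out = create_all_splits_alt layers_info
instance (layers_info : Int × Int) (out : List (List Int)) : Decidable (Spec_create_all_splits layers_info out) := by unfold Spec_create_all_splits; infer_instance

-- ===== CLAIM (what is proved, stated in full; the proofs are below) =====
def Claim_equal_create_all_splits : Prop := ∀ (layers_info : Int × Int), Dom_create_all_splits layers_info → Spec_create_all_splits layers_info (create_all_splits layers_info)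

-- ===== LEMMAS AND PROOFS =====

-- both sides reduce to this common nested fold of Set.add over windows, by length then by start
def canonSplits (layers : List Int) : List (List Int) :=
  (List.range layers.length).foldl
    (fun res k =>
      ((List.range (layers.length - k)).map (fun j => (layers.drop j).take (k + 1))).foldl
        PySem.Set.add res)
    []

lemma headI_drops (t : List Int) (k : Nat) (hk : k ≤ t.length) :
    (List.range k).map (fun n => (t.drop n).headI) = t.take k := by
  apply List.ext_getElem
  · simp [hk]
  · intro i h1 h2
    simp only [List.getElem_map, List.getElem_range, List.getElem_take]
    have hi : i < t.length := by simp at h1 h2; omega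
    rw [List.drop_eq_getElem_cons hi]
    rfl

lemma zipHeads_drops (xs : List Int) (m : Nat) :
    zipHeads ((List.range (m + 1)).map (fun n => xs.drop n)) =
      (List.range (xs.length + 1 - (m + 1))).map (fun j => (xs.drop j).take (m + 1)) := by
  induction xs with
  | nil =>
    rw [List.range_succ_eq_map]
    simp only [List.map_cons, List.drop_nil, List.map_map]
    rw [zipHeads.eq_2]
    have : ([] : List Int).length + 1 - (m + 1) = 0 := by simp
    rw [this, List.range_zero, List.map_nil]
  | cons a t ih =>
    rw [List.range_succ_eq_map]
    simp only [List.map_cons, List.map_map, List.drop_zero]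
    have hdrop : ((fun n => (a :: t).drop n) ∘ Nat.succ) = fun n => t.drop n := by
      funext n; rfl
    rw [hdrop]
    by_cases hm : m ≤ t.length
    · have hany : ((List.range m).map (fun n => t.drop n)).any List.isEmpty = false := by
        simp only [List.any_eq_false]
        intro l hl
        simp only [List.mem_map, List.mem_range] at hl
        obtain ⟨n, hn, rfl⟩ := hl
        simp [List.isEmpty_iff, List.drop_eq_nil_iff]
        omega
      rw [zipHeads.eq_3, hany]
      simp only [Bool.false_eq_true, if_false, List.map_map]
      have hheads : ((List.range m).map ((fun l => l.headI) ∘ fun n => t.drop n)) = t.take m := by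
        simpa using headI_drops t m hm
      have htails : ((List.range m).map ((fun l => l.tail) ∘ fun n => t.drop n)) =
          (List.range m).map (fun n => t.drop (n + 1)) := by
        simp [Function.comp, List.tail_drop]
      rw [hheads]
      have harg : t :: (List.range m).map ((fun l => l.tail) ∘ fun n => t.drop n) =
          (List.range (m + 1)).map (fun n => t.drop n) := by
        rw [htails, List.range_succ_eq_map]
        simp
      rw [harg, ih]
      have hlen : (a :: t).length + 1 - (m + 1) = (t.length + 1 - (m + 1)) + 1 := by
        simp; omega
      rw [hlen, List.range_succ_eq_map]
      simp [Function.comp, List.take_succ_cons, List.drop_succ_cons]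
    · have hany : ((List.range m).map (fun n => t.drop n)).any List.isEmpty = true := by
        simp only [List.any_eq_true]
        refine ⟨[], ?_, rfl⟩
        simp only [List.mem_map, List.mem_range]
        exact ⟨t.length, by omega, by simp⟩
      rw [zipHeads.eq_3, hany]
      simp only [if_true]
      have : (a :: t).length + 1 - (m + 1) = 0 := by simp; omega
      rw [this]
      simp
  
lemma groupBy_const (c : Int) : ∀ (l : List (Int × Int)), l ≠ [] →
    (∀ p ∈ l, p.1 - p.2 = c) → pyGroupByKeyDiff l = [l] := by
  intro l
  induction l with
  | nil => intro h; exact absurd rfl h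
  | cons x xs ih =>
    intro _ hc
    cases xs with
    | nil => rfl
    | cons y t =>
      have hrec : pyGroupByKeyDiff (y :: t) = [y :: t] := by
        apply ih (by simp)
        intro p hp; exact hc p (List.mem_cons_of_mem x hp)
      rw [pyGroupByKeyDiff, hrec]
      have hx : x.1 - x.2 = c := hc x (by simp)
      have hy : y.1 - y.2 = c := hc y (by simp)
      simp [hx, hy]

lemma consec_eq_windows (s : Int) (xs : List Int)
    (hconst : ∀ (k : Nat) (h : k < xs.length), xs[k] = s + k) (m : Nat) :
    consecutive_subseq xs (m + 1) =
      (List.range (xs.length + 1 - (m + 1))).map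
        (fun j => (xs.drop j).take (m + 1)) := by
  by_cases hnil : xs = []
  · rw [consecutive_subseq, hnil]
    simp [PySem.List.enumerate, pyGroupByKeyDiff]
  · have hgrp : pyGroupByKeyDiff (PySem.List.enumerate xs 0) = [PySem.List.enumerate xs 0] := by
      apply groupBy_const (-s)
      · intro h
        apply hnil
        cases hx : xs with
        | nil => rfl
        | cons z zs => rw [hx] at h; simp [PySem.List.enumerate_cons] at h
      · intro p hp
        rw [PySem.List.mem_enumerate_iff] at hp
        obtain ⟨k, hk, rfl⟩ := hp
        have := hconst k hk
        simp [this]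
    rw [consecutive_subseq, hgrp]
    simp only [List.flatMap_cons, List.flatMap_nil, List.append_nil,
      PySem.List.map_snd_enumerate]
    exact zipHeads_drops xs m

lemma foldl_flatMap {α β γ : Type} (g : α → List β) (f : γ → β → γ) (l : List α) (init : γ) :
    (l.flatMap g).foldl f init = l.foldl (fun acc x => (g x).foldl f acc) init := by
  induction l generalizing init with
  | nil => rfl
  | cons x xs ih => simp [List.flatMap_cons, List.foldl_append, ih]

lemma A_eq_canon (s e : Int) :
    create_all_splits (s, e) = canonSplits (PySem.List.pyRange s (e + 1) 1) := by
  set layers := PySem.List.pyRange s (e + 1) 1 with hlay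
  show PySem.Set.ofList
      ((PySem.List.pyRange 0 (e - s + 1) 1).foldl
        (fun acc cur_index => acc ++ consecutive_subseq layers (cur_index + 1).toNat) []) =
    canonSplits layers
  rw [PySem.List.foldl_append_eq_flatMap, List.nil_append, PySem.Set.ofList_eq_foldl,
    foldl_flatMap, PySem.List.pyRange_one 0 (e - s + 1), List.foldl_map]
  have hlen : (e - s + 1 - 0).toNat = layers.length := by
    rw [hlay, PySem.List.length_pyRange_one]; omega
  have hconst : ∀ (k : Nat) (h : k < layers.length), layers[k] = s + k := by
    intro k h
    exact PySem.List.getElem_pyRange_one s (e + 1) k h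
  rw [hlen]
  unfold canonSplits
  congr 1
  funext acc k
  have hidx : ((0 : Int) + (k : Int) + 1).toNat = k + 1 := by omega
  rw [hidx, consec_eq_windows s layers hconst k]
  have : layers.length + 1 - (k + 1) = layers.length - k := by omega
  rw [this]

lemma B_eq_canon (s e : Int) :
    create_all_splits_alt (s, e) = canonSplits (PySem.List.pyRange s (e + 1) 1) := by
  set layers := PySem.List.pyRange s (e + 1) 1 with hlay
  show (PySem.List.pyRange 1 ((layers.length : Int) + 1) 1).foldl
      (fun res len =>
        (PySem.List.pyRange 0 ((layers.length : Int) - len + 1) 1).foldl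
          (fun res i => PySem.Set.add res (PySem.List.slice layers (some i) (some (i + len)))) res)
      PySem.Set.empty = canonSplits layers
  rw [PySem.List.pyRange_one 1 ((layers.length : Int) + 1), List.foldl_map]
  have h1 : ((layers.length : Int) + 1 - 1).toNat = layers.length := by omega
  rw [h1]
  unfold canonSplits
  show _ = (List.range layers.length).foldl _ ([] : List (List Int))
  congr 1
  funext res k
  have h2 : ((layers.length : Int) - (1 + (k : Int)) + 1) = ((layers.length : Int) - (k : Int)) := by ring
  rw [h2, PySem.List.pyRange_one 0, List.foldl_map]
  have h3 : ((layers.length : Int) - (k : Int) - 0).toNat = layers.length - k := by omega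
  rw [h3, List.foldl_map]
  congr 1
  funext res j
  have h4 : (0 : Int) + (j : Int) + (1 + (k : Int)) = (j : Int) + ((k + 1 : Nat) : Int) := by
    push_cast; ring
  rw [h4, zero_add, PySem.List.slice_natCast_add]

-- ===== VERDICT (by name: the statement is the Claim_ definition above) =====
theorem create_all_splits_spec : Claim_equal_create_all_splits := by
  intro li _
  unfold Spec_create_all_splits
  obtain ⟨s, e⟩ := li
  rw [A_eq_canon, B_eq_canon]
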